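-- pv_equiv track=rewrite | github.com/andrewdunn358-dev/Radiocheck | backend/safety/text_normalizer.py | _is_excessive_caps
-- ===== SOURCE A (Python) =====
-- def _is_excessive_caps(text: str) -> bool:
--     """Check if more than 4 consecutive words are all-caps."""
--     words = text.split()
--     consecutive_caps = 0
--     for word in words:
--         if word.isupper() and len(word) > 1:
--             consecutive_caps += 1
--             if consecutive_caps > 4:
--                 return True
--         else:
--             consecutive_caps = 0
--     return False
-- ===== SOURCE B (Python) =====
-- def _is_excessive_caps(text: str) -> bool:
--     """Check if more than 4 consecutive words are all-caps."""
--     caps = [w.isupper() and len(w) > 1 for w in text.split()]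
--     return any(all(caps[i:i + 5]) for i in range(len(caps) - 4))
-- ===== Notes on version B (the rewrite author's own statement) =====
-- stated objective: alternative
-- what changed: Replaced the rolling consecutive-caps counter with a declarative sliding-window check: build the per-word caps-flag list once, then ask whether any window of 5 consecutive flags is all True.
import Mathlib
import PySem

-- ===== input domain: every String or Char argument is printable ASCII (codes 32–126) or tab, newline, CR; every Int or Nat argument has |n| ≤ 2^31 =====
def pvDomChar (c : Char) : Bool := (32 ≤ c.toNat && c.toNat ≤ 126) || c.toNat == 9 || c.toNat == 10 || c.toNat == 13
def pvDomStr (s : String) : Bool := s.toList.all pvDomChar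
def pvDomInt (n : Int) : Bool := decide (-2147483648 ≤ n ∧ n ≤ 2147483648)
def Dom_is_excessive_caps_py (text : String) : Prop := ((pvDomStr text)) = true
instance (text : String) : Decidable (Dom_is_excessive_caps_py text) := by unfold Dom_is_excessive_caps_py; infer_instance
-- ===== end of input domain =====

-- B replaces A's rolling consecutive-caps counter by a sliding-window check over the per-word caps flags (alternative decomposition, same cost).

-- ===== PORT A =====
-- w.isupper(): at least one cased char and no lowercase cased char; exact on the printable-ASCII domain,
-- where the cased characters are exactly the Latin letters.
def pvIsUpper (cs : List Char) : Bool :=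
  cs.any PySem.Chars.isalpha && cs.all (fun c => !PySem.Chars.islower c)

-- the per-word condition 'word.isupper() and len(word) > 1' (shared verbatim by A's loop and B's comprehension)
def pvCapsWord (w : List Char) : Bool := pvIsUpper w && decide (1 < w.length)

-- A's for-loop with the rolling counter and early return
def pvCapsLoop : List (List Char) → Nat → Bool
  | [], _ => false
  | w :: ws, k =>
    if pvCapsWord w then
      if k + 1 > 4 then true else pvCapsLoop ws (k + 1)
    else pvCapsLoop ws 0

def is_excessive_caps_py (text : String) : Bool :=
  pvCapsLoop (PySem.Chars.split₀ text.toList) 0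

-- ===== PORT B =====
-- any(all(caps[i:i+5]) for i in range(len(caps) - 4))
def pvWin5 (caps : List Bool) : Bool :=
  (PySem.List.pyRange 0 ((caps.length : Int) - 4) 1).any
    (fun i => (PySem.List.slice caps (some i) (some (i + 5))).all id)

def is_excessive_caps_py_alt (text : String) : Bool :=
  pvWin5 ((PySem.Chars.split₀ text.toList).map pvCapsWord)

-- ===== PRECONDITION & SPEC =====
def Spec_is_excessive_caps_py (text : String) (out : Bool) : Prop := out = is_excessive_caps_py_alt text
instance (text : String) (out : Bool) : Decidable (Spec_is_excessive_caps_py text out) := by unfold Spec_is_excessive_caps_py; infer_instance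

-- ===== CLAIM (what is proved, stated in full; the proofs are below) =====
def Claim_equal_is_excessive_caps_py : Prop := ∀ (text : String), Dom_is_excessive_caps_py text → Spec_is_excessive_caps_py text (is_excessive_caps_py text)

-- ===== LEMMAS AND PROOFS =====

-- A's counter loop on the flag list (proof helper)
def pvLoopF : List Bool → Nat → Bool
  | [], _ => false
  | b :: t, k =>
    if b then (if k + 1 > 4 then true else pvLoopF t (k + 1)) else pvLoopF t 0

lemma pvCapsLoop_eq_loopF (ws : List (List Char)) (k : Nat) :
    pvCapsLoop ws k = pvLoopF (ws.map pvCapsWord) k := by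
  induction ws generalizing k with
  | nil => rfl
  | cons w t ih =>
    simp only [pvCapsLoop, List.map_cons, pvLoopF]
    by_cases hw : pvCapsWord w
    · simp only [hw, if_true]
      split
      · rfl
      · exact ih _
    · simp only [Bool.not_eq_true] at hw
      simp only [hw, Bool.false_eq_true, if_false]
      exact ih 0

-- a run of 5 consecutive 'true' flags starting anywhere, as a structural recursion
def pvWinRec : List Bool → Bool
  | [] => false
  | b :: t => (decide (5 ≤ (b :: t).length) && ((b :: t).take 5).all id) || pvWinRec t

lemma pvWinRec_of_short (f : List Bool) (h : f.length ≤ 4) : pvWinRec f = false := by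
  induction f with
  | nil => rfl
  | cons b t ih =>
    simp only [pvWinRec]
    have h1 : t.length ≤ 4 := by simp only [List.length_cons] at h; omega
    have hf : decide (5 ≤ (b :: t).length) = false := decide_eq_false (by omega)
    rw [ih h1, hf]
    simp

lemma pvWinRec_absorb (t : List Bool) :
    ((decide (5 ≤ t.length) && (t.take 5).all id) || pvWinRec t) = pvWinRec t := by
  cases t with
  | nil => simp
  | cons x s =>
    conv_rhs => rw [pvWinRec]
    rw [pvWinRec, ← Bool.or_assoc, Bool.or_self]

-- A's counter loop, characterised: it fires iff the first (5-k) flags are all true, or some window of 5 is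
lemma pvLoopF_char (f : List Bool) (k : Nat) (hk : k ≤ 4) :
    pvLoopF f k =
      ((decide (5 - k ≤ f.length) && (f.take (5 - k)).all id) || pvWinRec f) := by
  induction f generalizing k with
  | nil =>
    simp [pvLoopF, pvWinRec]; omega
  | cons b t ih =>
    simp only [pvLoopF]
    cases b with
    | false =>
      simp only [Bool.false_eq_true, if_false]
      rw [ih 0 (by omega)]
      have e0 : ((false :: t).take (5 - k)).all id = false := by
        have e1 : (5 : Nat) - k = (5 - k - 1) + 1 := by omega
        rw [e1, List.take_succ_cons]; simp
      have eh : ((false :: t).take 5).all id = false := by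
        rw [show (5 : Nat) = 4 + 1 from rfl, List.take_succ_cons]; simp
      simp only [pvWinRec, e0, eh, Nat.sub_zero, Bool.and_false, Bool.false_or]
      exact pvWinRec_absorb t
    | true =>
      simp only [if_true]
      by_cases h4 : k + 1 > 4
      · have hk4 : k = 4 := by omega
        subst hk4
        simp only [h4, if_true]
        have : (decide (5 - 4 ≤ (true :: t).length) && ((true :: t).take (5 - 4)).all id) = true := by
          simp [List.length_cons]
        rw [this]; simp
      · have hk' : k + 1 ≤ 4 := by omega
        simp only [h4, if_false]
        rw [ih (k + 1) hk']
        have e1 : (5 : Nat) - k = (5 - (k + 1)) + 1 := by omega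
        have e2 : ((true :: t).take (5 - k)).all id = ((t.take (5 - (k + 1))).all id) := by
          rw [e1, List.take_succ_cons]; simp
        have e3 : (decide (5 - k ≤ (true :: t).length)) = decide (5 - (k+1) ≤ t.length) := by
          simp only [List.length_cons, decide_eq_decide]; omega
        rw [e2, e3]
        simp only [pvWinRec]
        cases hp : (t.take (5 - (k + 1))).all id
        · cases hq : (decide (5 ≤ (true :: t).length) && ((true :: t).take 5).all id)
          · simp
          · exfalso
            simp only [Bool.and_eq_true, decide_eq_true_eq, List.all_eq_true] at hq
            have hall : ∀ x ∈ t.take (5 - (k + 1)), id x = true := by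
              intro x hx
              refine hq.2 x ?_
              rw [show (5 : Nat) = 4 + 1 from rfl, List.take_succ_cons]
              have hx' : x ∈ (t.take 4).take (5 - (k + 1)) := by
                rw [List.take_take, min_eq_left (by omega)]; exact hx
              exact List.mem_cons_of_mem _ (List.mem_of_mem_take hx')
            rw [List.all_eq_false] at hp
            obtain ⟨x, hx1, hx2⟩ := hp
            exact hx2 (hall x hx1)
        · by_cases hl : 5 - (k + 1) ≤ t.length
          · rw [decide_eq_true hl]
            simp
          · have ht4 : t.length ≤ 4 := by omega
            have hlen : decide (5 ≤ (true :: t).length) = false := by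
              simp only [List.length_cons, decide_eq_false_iff_not]; omega
            have hlen' : decide (5 - (k + 1) ≤ t.length) = false := by
              simp only [decide_eq_false_iff_not]; omega
            rw [pvWinRec_of_short t ht4, hlen, hlen']
            simp

-- B's range-of-slices scan equals the structural recursion
lemma pvWin5_eq (f : List Bool) : pvWin5 f = pvWinRec f := by
  induction f with
  | nil => decide
  | cons b t ih =>
    by_cases h : (b :: t).length ≤ 4
    · rw [pvWinRec_of_short _ h]
      unfold pvWin5
      have hr : PySem.List.pyRange 0 (((b :: t).length : Int) - 4) 1 = [] := by
        have h' : (b :: t).length ≤ 4 := h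
        simp only [PySem.List.pyRange]
        split <;> simp_all
      rw [hr]; rfl
    · have h5 : 5 ≤ (b :: t).length := by omega
      have hn : (b :: t).length - 4 = (t.length - 4) + 1 := by
        simp only [List.length_cons] at h5 ⊢; omega
      unfold pvWin5
      have hc : (((b :: t).length : Int) - 4) = (((b :: t).length - 4 : Nat) : Int) := by omega
      rw [hc, PySem.List.pyRange_zero_natCast, hn, List.range_succ_eq_map]
      simp only [List.map_cons, List.any_cons, List.map_map]
      simp only [pvWinRec]
      congr 1
      · -- head window: slice (b::t) [0:5] = take 5, of full length since 5 ≤ |b::t|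
        rw [show (((0 : Nat) : Int) + 5) = (((0 : Nat) : Int) + ((5 : Nat) : Int)) by norm_num]
        rw [PySem.List.slice_natCast_add, decide_eq_true h5]
        simp
      · rw [← ih]
        by_cases ht : 5 ≤ t.length
        · have htc : ((t.length : Int) - 4) = ((t.length - 4 : Nat) : Int) := by omega
          unfold pvWin5
          rw [htc, PySem.List.pyRange_zero_natCast, List.any_map, List.any_map]
          refine List.any_congr rfl (fun i => ?_)
          simp only [Function.comp, Nat.succ_eq_add_one]
          rw [show ((((i + 1 : Nat)) : Int) + 5) = ((((i + 1 : Nat)) : Int) + ((5 : Nat) : Int)) by norm_num]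
          rw [PySem.List.slice_natCast_add]
          rw [show (((i : Nat) : Int) + 5) = (((i : Nat) : Int) + ((5 : Nat) : Int)) by norm_num]
          rw [PySem.List.slice_natCast_add]
          simp [List.drop_succ_cons]
        · have hte : t.length = 4 := by
            simp only [List.length_cons] at h5; omega
          have hw : pvWin5 t = false := by rw [ih]; exact pvWinRec_of_short t (by omega)
          rw [hw]
          have : t.length - 4 = 0 := by omega
          rw [this]
          rfl

-- ===== VERDICT (by name: the statement is the Claim_ definition above) =====
theorem is_excessive_caps_py_spec : Claim_equal_is_excessive_caps_py := by
  intro text _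
  unfold Spec_is_excessive_caps_py is_excessive_caps_py is_excessive_caps_py_alt
  rw [pvCapsLoop_eq_loopF, pvLoopF_char _ 0 (by omega), pvWin5_eq]
  generalize (PySem.Chars.split₀ text.toList).map pvCapsWord = f
  simp only [Nat.sub_zero]
  exact pvWinRec_absorb f
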